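-- pv_equiv track=rewrite | github.com/wonjun6715/coding_test | 프로그래머스/lv0/120871. 저주의 숫자 3/저주의 숫자 3.py | solution
-- ===== SOURCE A (Python) =====
-- def solution(n):
--     a = 1
--     b = 1
--     while a != n:
--         a += 1
--         b += 1
--         while '3' in str(b) or b % 3 == 0:
--             b += 1
--     return b
-- ===== SOURCE B (Python) =====
-- # B: closed form via base-9 indexing. Numbers without digit 3 are exactly
-- # no_three(k) for k = 0,1,2,... (k written in base 9 with digits mapped over
-- # {0,1,2,4,5,6,7,8,9}, order preserving).  In each block of 9 consecutive
-- # indices 9j..9j+8 exactly 6 decode to numbers not divisible by 3, so the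
-- # n-th curse-free number has index k = 9*j + (i-th valid digit), where
-- # j, i = divmod(n-1, 6) and validity of a last digit depends only on
-- # no_three(j) mod 3.
-- def solution(n):
--     j, i = divmod(n - 1, 6)
--     # r = no_three(j) % 3
--     r = 0
--     t = j
--     while t:
--         t, d = divmod(t, 9)
--         r += d + (d >= 3)
--     r %= 3
--     digs = [d for d in range(9) if (r + d + (d >= 3)) % 3]
--     k = 9 * j + digs[i]
--     # decode k: m = no_three(k)
--     m = 0
--     p = 1
--     while k:
--         k, d = divmod(k, 9)
--         m += (d + (d >= 3)) * p
--         p *= 10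
--     return m
-- ===== Notes on version B (the rewrite author's own statement) =====
-- stated objective: faster
-- what changed: A scans every integer upward, string-testing each for the digit 3 and divisibility by 3, until the n-th survivor; B computes the answer in closed form: numbers without digit 3 correspond order-preservingly to base-9 numerals, each block of 9 consecutive indices contains exactly 6 numbers not divisible by 3, so the n-th valid index is 9*((n-1)//6) plus a table digit, which is then decoded.
import Mathlib
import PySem

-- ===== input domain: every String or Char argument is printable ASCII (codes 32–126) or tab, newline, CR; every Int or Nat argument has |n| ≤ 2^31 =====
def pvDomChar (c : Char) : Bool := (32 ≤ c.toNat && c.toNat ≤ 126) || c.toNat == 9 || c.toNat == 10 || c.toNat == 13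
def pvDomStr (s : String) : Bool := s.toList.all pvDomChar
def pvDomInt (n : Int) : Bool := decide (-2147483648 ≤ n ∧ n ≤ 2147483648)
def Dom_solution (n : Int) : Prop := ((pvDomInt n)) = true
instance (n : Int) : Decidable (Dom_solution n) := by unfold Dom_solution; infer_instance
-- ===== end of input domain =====

-- B replaces A's linear scan (which tests every integer via str) by an O(log n) closed form:
-- numbers without digit 3 are indexed by base-9 numerals, and each block of 9 consecutive
-- indices holds exactly 6 numbers that are not multiples of 3.

-- ===== PORT A =====
-- the condition of A's inner while loop: '3' in str(b) or b % 3 == 0   (b stays ≥ 1 throughout)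

def condA (b : Nat) : Bool :=
  PySem.Str.isIn "3" (PySem.Int.toStr (b : Int)) || (PySem.Int.mod (b : Int) 3 == 0)

-- inner loop:  while '3' in str(b) or b % 3 == 0: b += 1
-- (the fuel argument is a totality guard only; skipA_eq below shows 10^b + 1 steps always
--  suffice to reach a number with no digit 3 that is not a multiple of 3)
def skipAFuel : Nat → Nat → Nat
  | 0, b => b
  | f + 1, b => if condA b then skipAFuel f (b + 1) else b

def skipA (b : Nat) : Nat := skipAFuel (10 ^ b + 1) b

-- outer loop:  while a != n: a += 1; b += 1; <inner loop>
-- (the `a < n` test only makes the recursion total: for n < 1 Python never terminates, excluded by Pre_)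
def loopA (n a : Int) (b : Nat) : Nat :=
  if a = n then b
  else if a < n then loopA n (a + 1) (skipA (b + 1))
  else b
termination_by (n - a).toNat
decreasing_by omega

def solution (n : Int) : Int := (loopA n 1 1 : Int)

-- ===== PORT B =====
-- d + (d >= 3)
def eshift (d : Nat) : Nat := d + (if 3 ≤ d then 1 else 0)

-- the decode loop: m = 0; p = 1; while k: k, d = divmod(k, 9); m += (d + (d >= 3)) * p; p *= 10
def noThree (k : Nat) : Nat :=
  if h : k = 0 then 0 else noThree (k / 9) * 10 + eshift (k % 9)
decreasing_by exact Nat.div_lt_self (by omega) (by omega)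

-- the r loop: r = 0; t = j; while t: t, d = divmod(t, 9); r += d + (d >= 3)
def rsum (t : Nat) : Nat :=
  if h : t = 0 then 0 else rsum (t / 9) + eshift (t % 9)
decreasing_by exact Nat.div_lt_self (by omega) (by omega)

-- digs = [d for d in range(9) if (r + d + (d >= 3)) % 3]
def validDigits (r : Nat) : List Nat :=
  (List.range 9).filter (fun d => (r + eshift d) % 3 != 0)

-- j, i kept as Nat (.toNat is a totality guard only: for n ≤ 0 the Python r-loop never
-- terminates on the negative j, and those n are excluded by Pre_)
def solution_alt (n : Int) : Int :=
  let j : Nat := (PySem.Int.floordiv (n - 1) 6).toNat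
  let i : Nat := (PySem.Int.mod (n - 1) 6).toNat
  let r : Nat := rsum j % 3
  let digs := validDigits r
  let k := 9 * j + digs.getD i 0
  (noThree k : Int)

-- ===== PRECONDITION & SPEC =====
-- Pre_: A's outer loop counts a upward from 1 until a == n, so for n < 1 Python A never returns.
def Pre_solution (n : Int) : Prop := 1 ≤ n
instance (n : Int) : Decidable (Pre_solution n) := by unfold Pre_solution; infer_instance

def pvWitness_solution : Int := (5)

def Spec_solution (n : Int) (out : Int) : Prop := out = solution_alt n
instance (n : Int) (out : Int) : Decidable (Spec_solution n out) := by unfold Spec_solution; infer_instance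

-- ===== CLAIM (what is proved, stated in full; the proofs are below) =====
def Claim_equal_solution : Prop := ∀ (n : Int), Dom_solution n → Pre_solution n → Spec_solution n (solution n)

-- ===== LEMMAS AND PROOFS =====

-- ---- the string test '3' in str(b) is the arithmetic digit test has3 ----

def has3 (n : Nat) : Bool :=
  if h : n < 10 then n == 3 else (n % 10 == 3) || has3 (n / 10)
decreasing_by exact Nat.div_lt_self (by omega) (by omega)

theorem has3_lt {n : Nat} (h : n < 10) : has3 n = (n == 3) := by
  rw [has3]; rw [dif_pos h]

theorem has3_ge {n : Nat} (h : 10 ≤ n) : has3 n = ((n % 10 == 3) || has3 (n / 10)) := by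
  rw [has3]; rw [dif_neg (by omega : ¬ n < 10)]

theorem digitChar_eq_three (d : Nat) (hd : d < 10) : (Nat.digitChar d = '3') ↔ d = 3 := by
  interval_cases d <;> simp [Nat.digitChar]

theorem mem_toDigitsCore (f : Nat) : ∀ (n : Nat) (acc : List Char), n ≤ f →
    ('3' ∈ Nat.toDigitsCore 10 f n acc ↔ (has3 n = true ∨ '3' ∈ acc)) := by
  induction f with
  | zero =>
    intro n acc hn
    have : n = 0 := by omega
    subst this
    simp [Nat.toDigitsCore, has3]
  | succ f ih =>
    intro n acc hn
    rw [Nat.toDigitsCore]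
    by_cases h0 : n / 10 = 0
    · have hn10 : n < 10 := by omega
      rw [if_pos h0, has3_lt hn10]
      simp only [List.mem_cons]
      have : n % 10 = n := Nat.mod_eq_of_lt hn10
      rw [this]
      constructor
      · rintro (h | h)
        · exact Or.inl (by simpa using (digitChar_eq_three n hn10).mp h.symm)
        · exact Or.inr h
      · rintro (h | h)
        · exact Or.inl (((digitChar_eq_three n hn10).mpr (by simpa using h)).symm)
        · exact Or.inr h
    · have h10 : 10 ≤ n := by
        by_contra hc
        exact h0 (Nat.div_eq_of_lt (by omega))
      rw [if_neg h0, ih (n / 10) _ (by omega), has3_ge h10]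
      simp only [List.mem_cons]
      have hd := digitChar_eq_three (n % 10) (Nat.mod_lt _ (by omega))
      constructor
      · rintro (h | h | h)
        · left; simp [h]
        · left; simp [hd.mp h.symm]
        · exact Or.inr h
      · rintro (h | h)
        · simp only [Bool.or_eq_true, beq_iff_eq] at h
          rcases h with h | h
          · exact Or.inr (Or.inl (hd.mpr h).symm)
          · exact Or.inl h
        · exact Or.inr (Or.inr h)

theorem mem_toDigits (n : Nat) : '3' ∈ Nat.toDigits 10 n ↔ has3 n = true := by
  rw [Nat.toDigits]
  rw [mem_toDigitsCore (n + 1) n [] (by omega)]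
  simp

theorem condA_eq (b : Nat) : condA b = (has3 b || b % 3 == 0) := by
  unfold condA
  have hmem : '3' ∈ PySem.Int.toChars (b : Int) ↔ has3 b = true := by
    rw [PySem.Int.toChars]
    rw [if_neg (by omega : ¬ (b : Int) < 0), Int.toNat_natCast]
    exact mem_toDigits b
  have h1 : PySem.Str.isIn "3" (PySem.Int.toStr (b : Int)) = has3 b := by
    rw [Bool.eq_iff_iff, PySem.Str.isIn_iff_infix, PySem.Int.toList_toStr, ← hmem]
    constructor
    · intro hc
      exact hc.mem (by simp)
    · intro hm
      rcases List.append_of_mem hm with ⟨l1, l2, hl⟩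
      exact ⟨l1, l2, by simp [hl]⟩
  have h2 := PySem.Int.mod_natCast b 3
  rw [show ((3 : Nat) : Int) = (3 : Int) from rfl] at h2
  rw [h1, h2]
  congr 1
  simp
  omega

-- ---- characterisation of skipA: least valid number ≥ b ----

theorem has3_pow10 (j : Nat) : has3 (10 ^ j) = false := by
  induction j with
  | zero => rw [pow_zero, has3_lt (by omega)]; decide
  | succ j ih =>
    have h10 : 10 ≤ 10 ^ (j + 1) := by
      have := Nat.one_le_pow j 10 (by omega)
      rw [pow_succ]; omega
    rw [has3_ge h10, pow_succ]
    simp [Nat.mul_mod_left, ih]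

theorem pow10_mod3 (j : Nat) : 10 ^ j % 3 = 1 := by
  induction j with
  | zero => rfl
  | succ j ih => rw [pow_succ]; omega

theorem condA_pow10 (j : Nat) : condA (10 ^ j) = false := by
  rw [condA_eq, has3_pow10]
  have := pow10_mod3 j
  simp; omega

theorem skipAFuel_eq (f : Nat) : ∀ (b m : Nat), b ≤ m → m < b + f → condA m = false →
    (∀ x, b ≤ x → x < m → condA x = true) → skipAFuel f b = m := by
  induction f with
  | zero => intro b m h1 h2 _ _; omega
  | succ f ih =>
    intro b m h1 h2 hm h3
    rw [skipAFuel]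
    by_cases hb : condA b = true
    · rw [if_pos hb]
      have hbm : b < m := by
        rcases Nat.lt_or_ge b m with h | h
        · exact h
        · exfalso; have : b = m := by omega
          rw [this] at hb; rw [hm] at hb; exact Bool.false_ne_true hb
      exact ih (b + 1) m (by omega) (by omega) hm (fun x hx1 hx2 => h3 x (by omega) hx2)
    · rw [if_neg hb]
      rcases Nat.lt_or_ge b m with h | h
      · exact absurd (h3 b (le_refl b) h) hb
      · omega

theorem skipA_eq (b m : Nat) (h1 : b ≤ m) (h2 : condA m = false)
    (h3 : ∀ x, b ≤ x → x < m → condA x = true) : skipA b = m := by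
  have hm : m ≤ 10 ^ b := by
    rcases Nat.lt_or_ge (10 ^ b) m with h | h
    · exfalso
      have hb10 : b ≤ 10 ^ b := (Nat.lt_pow_self (by omega)).le
      have := h3 (10 ^ b) hb10 h
      rw [condA_pow10] at this
      exact Bool.false_ne_true this
    · exact h
  exact skipAFuel_eq (10 ^ b + 1) b m h1 (by omega) h2 h3

-- ---- noThree is the order isomorphism onto numbers without digit 3 ----

theorem noThree_eq (k : Nat) : noThree k = noThree (k / 9) * 10 + eshift (k % 9) := by
  by_cases h : k = 0
  · subst h; rw [noThree]; simp [eshift]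
  · rw [noThree]; rw [dif_neg h]

theorem noThree_zero : noThree 0 = 0 := by rw [noThree]; simp

theorem noThree_one : noThree 1 = 1 := by
  rw [noThree_eq, noThree_zero]
  decide

theorem eshift_lt {d : Nat} (h : d < 9) : eshift d < 10 := by
  unfold eshift; split <;> omega

theorem eshift_mono {d d' : Nat} (h : d < d') : eshift d < eshift d' := by
  unfold eshift; split <;> split <;> omega

theorem eshift_ne_three (d : Nat) : eshift d ≠ 3 := by
  unfold eshift; split <;> omega

theorem noThree_block (j d : Nat) (hd : d < 9) :
    noThree (9 * j + d) = noThree j * 10 + eshift d := by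
  rw [noThree_eq (9 * j + d)]
  have e1 : (9 * j + d) / 9 = j := by omega
  have e2 : (9 * j + d) % 9 = d := by omega
  rw [e1, e2]

theorem noThree_mono : ∀ k' k : Nat, k < k' → noThree k < noThree k' := by
  intro k'
  induction k' using Nat.strong_induction_on with
  | _ k' ih =>
    intro k hk
    rw [noThree_eq k, noThree_eq k']
    rcases Nat.lt_or_ge (k / 9) (k' / 9) with h | h
    · have hk9 : k' / 9 < k' := Nat.div_lt_self (by omega) (by omega)
      have h1 := ih (k' / 9) hk9 (k / 9) h
      have h2 : eshift (k % 9) < 10 := eshift_lt (Nat.mod_lt _ (by omega))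
      omega
    · have hq : k / 9 = k' / 9 := by omega
      have hr : k % 9 < k' % 9 := by omega
      have := eshift_mono hr
      rw [hq]
      omega

theorem noThree_has3 : ∀ k : Nat, has3 (noThree k) = false := by
  intro k
  induction k using Nat.strong_induction_on with
  | _ k ih =>
    by_cases h0 : k = 0
    · subst h0; rw [noThree_zero, has3_lt (by omega)]; decide
    · rw [noThree_eq k]
      have hr : k % 9 < 9 := Nat.mod_lt _ (by omega)
      have he3 := eshift_ne_three (k % 9)
      have hel := eshift_lt hr
      by_cases hq : noThree (k / 9) = 0
      · rw [hq]
        rw [has3_lt (by omega)]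
        simp; omega
      · have h10 : 10 ≤ noThree (k / 9) * 10 + eshift (k % 9) := by omega
        rw [has3_ge h10]
        have e1 : (noThree (k / 9) * 10 + eshift (k % 9)) % 10 = eshift (k % 9) := by omega
        have e2 : (noThree (k / 9) * 10 + eshift (k % 9)) / 10 = noThree (k / 9) := by omega
        rw [e1, e2]
        rw [ih (k / 9) (Nat.div_lt_self (by omega) (by omega))]
        simp; omega

theorem noThree_surj : ∀ m : Nat, has3 m = false → ∃ k, noThree k = m := by
  intro m
  induction m using Nat.strong_induction_on with
  | _ m ih =>
    intro hm
    by_cases h10 : m < 10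
    · rw [has3_lt h10] at hm
      have hm3 : m ≠ 3 := by simpa using hm
      refine ⟨if 4 ≤ m then m - 1 else m, ?_⟩
      rw [noThree_eq]
      have hlt : (if 4 ≤ m then m - 1 else m) < 9 := by split <;> omega
      have e1 : (if 4 ≤ m then m - 1 else m) / 9 = 0 := by omega
      have e2 : (if 4 ≤ m then m - 1 else m) % 9 = (if 4 ≤ m then m - 1 else m) := by omega
      rw [e1, e2, noThree_zero]
      unfold eshift
      split <;> split <;> omega
    · rw [has3_ge (by omega)] at hm
      simp only [Bool.or_eq_false_iff] at hm
      obtain ⟨hd3, hrec⟩ := hm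
      obtain ⟨k0, hk0⟩ := ih (m / 10) (Nat.div_lt_self (by omega) (by omega)) hrec
      have hd3' : m % 10 ≠ 3 := by simpa using hd3
      have hdlt : m % 10 < 10 := Nat.mod_lt _ (by omega)
      refine ⟨9 * k0 + (if 4 ≤ m % 10 then m % 10 - 1 else m % 10), ?_⟩
      rw [noThree_block _ _ (by split <;> omega)]
      rw [hk0]
      have he : eshift (if 4 ≤ m % 10 then m % 10 - 1 else m % 10) = m % 10 := by
        unfold eshift; split <;> split <;> omega
      rw [he]
      omega

-- ---- ghost index walk (proof-side mirror of the loop on base-9 indices) ----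

def condB (k : Nat) : Bool := noThree k % 3 == 0

theorem noThree_pow9 (j : Nat) : noThree (9 ^ j) = 10 ^ j := by
  induction j with
  | zero => rw [pow_zero, noThree_eq]; simp [noThree_zero, eshift]
  | succ j ih =>
    have h9 : 9 ^ (j + 1) = 9 * 9 ^ j + 0 := by rw [pow_succ]; ring
    rw [h9, noThree_block _ _ (by omega), ih]
    simp [eshift, pow_succ]

theorem exists_not_condB (k : Nat) : ∃ m, k ≤ m ∧ condB m = false := by
  refine ⟨9 ^ k, (Nat.lt_pow_self (by omega)).le, ?_⟩
  unfold condB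
  rw [noThree_pow9]
  have := pow10_mod3 k
  simp; omega

def skipB (k : Nat) : Nat :=
  if condB k then skipB (k + 1) else k
termination_by Nat.find (exists_not_condB k) - k
decreasing_by
  rename_i h
  have h1 := Nat.find_spec (exists_not_condB k)
  have h5 : k ≠ Nat.find (exists_not_condB k) := by
    intro he; rw [← he] at h1; simp [h] at h1
  have h3 : Nat.find (exists_not_condB (k + 1)) ≤ Nat.find (exists_not_condB k) := by
    apply Nat.find_min'
    refine ⟨by omega, h1.2⟩
  have h4 := h1.1
  omega

theorem skipB_le (k : Nat) : k ≤ skipB k := by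
  fun_induction skipB k with
  | case1 k h ih => omega
  | case2 k h => omega

theorem skipB_cond (k : Nat) : condB (skipB k) = false := by
  fun_induction skipB k with
  | case1 k h ih => exact ih
  | case2 k h => simpa using h

theorem skipB_min (k : Nat) : ∀ m, k ≤ m → m < skipB k → condB m = true := by
  fun_induction skipB k with
  | case1 k h ih =>
    intro m h1 h2
    rcases Nat.eq_or_lt_of_le h1 with he | hl
    · exact he ▸ h
    · exact ih m hl h2
  | case2 k h =>
    intro m h1 h2
    omega

theorem skipB_eq (k m : Nat) (h1 : k ≤ m) (h2 : condB m = false)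
    (h3 : ∀ x, k ≤ x → x < m → condB x = true) : skipB k = m := by
  rcases Nat.lt_trichotomy (skipB k) m with h | h | h
  · have := h3 (skipB k) (skipB_le k) h
    rw [skipB_cond k] at this
    exact absurd this (by simp)
  · exact h
  · have := skipB_min k m h1 h
    rw [h2] at this
    exact absurd this (by simp)

theorem step_eq (k : Nat) : noThree (skipB (k + 1)) = skipA (noThree k + 1) := by
  symm
  apply skipA_eq
  · have h1 := skipB_le (k + 1)
    have := noThree_mono (skipB (k + 1)) k (by omega)
    omega
  · rw [condA_eq, noThree_has3]
    have h2 := skipB_cond (k + 1)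
    unfold condB at h2
    simpa using h2
  · intro x hx1 hx2
    rw [condA_eq]
    rcases Bool.eq_false_or_eq_true (has3 x) with hh | hh
    · rw [hh]; simp
    · obtain ⟨kx, hkx⟩ := noThree_surj x hh
      have hk1 : k < kx := by
        by_contra hc
        replace hc := Nat.le_of_not_lt hc
        rcases Nat.eq_or_lt_of_le hc with he | hl
        · rw [he] at hkx; omega
        · have := noThree_mono k kx hl; omega
      have hk2 : kx < skipB (k + 1) := by
        by_contra hc
        replace hc := Nat.le_of_not_lt hc
        rcases Nat.eq_or_lt_of_le hc with he | hl
        · rw [← he] at hkx; omega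
        · have := noThree_mono kx (skipB (k + 1)) hl; omega
      have := skipB_min (k + 1) kx (by omega) hk2
      unfold condB at this
      rw [hkx] at this
      simp only [beq_iff_eq] at this
      rw [hh, this]
      simp

-- ---- the loops as iterates ----

def iterA : Nat → Nat → Nat
  | 0, b => b
  | j + 1, b => iterA j (skipA (b + 1))

def iterB : Nat → Nat → Nat
  | 0, k => k
  | j + 1, k => iterB j (skipB (k + 1))

theorem loopA_eq (j : Nat) : ∀ (n a : Int) (b : Nat), a ≤ n → (n - a).toNat = j →
    loopA n a b = iterA j b := by
  induction j with
  | zero =>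
    intro n a b h1 h2
    have : a = n := by omega
    rw [loopA, if_pos this]
    rfl
  | succ j ih =>
    intro n a b h1 h2
    have hne : a ≠ n := by omega
    have hlt : a < n := by omega
    rw [loopA, if_neg hne, if_pos hlt]
    rw [ih n (a + 1) (skipA (b + 1)) (by omega) (by omega)]
    rfl

theorem iterA_iterB (j : Nat) : ∀ k : Nat, iterA j (noThree k) = noThree (iterB j k) := by
  induction j with
  | zero => intro k; rfl
  | succ j ih =>
    intro k
    show iterA j (skipA (noThree k + 1)) = noThree (iterB j (skipB (k + 1)))
    rw [← step_eq k, ih (skipB (k + 1))]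

theorem iterB_succ_back (j : Nat) : ∀ k : Nat, iterB (j + 1) k = skipB (iterB j k + 1) := by
  induction j with
  | zero => intro k; rfl
  | succ j ih =>
    intro k
    show iterB (j + 1) (skipB (k + 1)) = skipB (iterB (j + 1) k + 1)
    rw [ih (skipB (k + 1))]
    rfl

-- ---- closed form of the index walk ----

def sigma (r i : Nat) : Nat := (validDigits r).getD i 0

theorem condB_block (j d : Nat) (hd : d < 9) :
    condB (9 * j + d) = ((noThree j % 3 + eshift d) % 3 == 0) := by
  unfold condB
  rw [noThree_block j d hd]
  have : (noThree j * 10 + eshift d) % 3 = (noThree j % 3 + eshift d) % 3 := by omega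
  rw [this]

theorem sig_incr : ∀ r, r < 3 → ∀ i, i < 5 →
    sigma r i < sigma r (i + 1) ∧ sigma r (i + 1) < 9 := by decide

theorem sig_valid : ∀ r, r < 3 → ∀ i, i < 6 → (r + eshift (sigma r i)) % 3 ≠ 0 := by decide

theorem sig_gap : ∀ r, r < 3 → ∀ i, i < 5 → ∀ d, d < 9 →
    sigma r i < d → d < sigma r (i + 1) → (r + eshift d) % 3 = 0 := by decide

theorem sig_max : ∀ r, r < 3 → sigma r 5 < 9 ∧
    (∀ d, d < 9 → sigma r 5 < d → (r + eshift d) % 3 = 0) := by decide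

theorem sig_min : ∀ r, r < 3 → sigma r 0 < 9 ∧
    (∀ d, d < sigma r 0 → (r + eshift d) % 3 = 0) := by decide

theorem main_index : ∀ N : Nat, iterB N 1 = 9 * (N / 6) + sigma (noThree (N / 6) % 3) (N % 6) := by
  intro N
  induction N with
  | zero =>
    show (1 : Nat) = 9 * 0 + sigma (noThree 0 % 3) 0
    rw [noThree_zero]
    decide
  | succ N ih =>
    rw [iterB_succ_back, ih]
    set j := N / 6 with hj
    set i := N % 6 with hi
    set r := noThree j % 3 with hr
    have hr3 : r < 3 := Nat.mod_lt _ (by omega)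
    have hi6 : i < 6 := Nat.mod_lt _ (by omega)
    by_cases hilt : i < 5
    · -- stay in the same index block
      have hj' : (N + 1) / 6 = j := by omega
      have hi' : (N + 1) % 6 = i + 1 := by omega
      rw [hj', hi', ← hr]
      obtain ⟨hs1, hs2⟩ := sig_incr r hr3 i hilt
      apply skipB_eq
      · omega
      · rw [condB_block j _ hs2, ← hr]
        have := sig_valid r hr3 (i + 1) (by omega)
        simp [this]
      · intro x hx1 hx2
        have hd9 : x - 9 * j < 9 := by omega
        have hx : x = 9 * j + (x - 9 * j) := by omega
        rw [hx, condB_block j _ hd9, ← hr]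
        have := sig_gap r hr3 i hilt (x - 9 * j) hd9 (by omega) (by omega)
        simp [this]
    · -- cross into the next index block
      have hi5 : i = 5 := by omega
      have hj' : (N + 1) / 6 = j + 1 := by omega
      have hi' : (N + 1) % 6 = 0 := by omega
      rw [hj', hi']
      set r' := noThree (j + 1) % 3 with hr'
      have hr3' : r' < 3 := Nat.mod_lt _ (by omega)
      obtain ⟨hm9, hmax⟩ := sig_max r hr3
      obtain ⟨hn9, hmin⟩ := sig_min r' hr3'
      rw [hi5]
      apply skipB_eq
      · omega
      · rw [condB_block (j + 1) _ hn9, ← hr']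
        have := sig_valid r' hr3' 0 (by omega)
        simp [this]
      · intro x hx1 hx2
        by_cases hxb : x < 9 * (j + 1)
        · have hd9 : x - 9 * j < 9 := by omega
          have hx : x = 9 * j + (x - 9 * j) := by omega
          rw [hx, condB_block j _ hd9, ← hr]
          have := hmax (x - 9 * j) hd9 (by omega)
          simp [this]
        · have hd9 : x - 9 * (j + 1) < sigma r' 0 := by omega
          have hx : x = 9 * (j + 1) + (x - 9 * (j + 1)) := by omega
          rw [hx, condB_block (j + 1) _ (by omega), ← hr']
          have := hmin (x - 9 * (j + 1)) hd9
          simp [this]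

theorem rsum_mod3 (t : Nat) : rsum t % 3 = noThree t % 3 := by
  induction t using Nat.strong_induction_on with
  | _ t ih =>
    by_cases h0 : t = 0
    · subst h0; rw [rsum, noThree_zero]; simp
    · rw [rsum, dif_neg h0, noThree_eq]
      have := ih (t / 9) (Nat.div_lt_self (by omega) (by omega))
      omega

-- ---- assembly ----

theorem final (n : Int) (hpre : 1 ≤ n) : solution n = solution_alt n := by
  unfold solution solution_alt
  set N := (n - 1).toNat with hN
  have hcast : n - 1 = (N : Int) := by omega
  have e1 : (PySem.Int.floordiv (n - 1) 6).toNat = N / 6 := by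
    rw [hcast]
    rw [show (6 : Int) = ((6 : Nat) : Int) from rfl, PySem.Int.floordiv_natCast]
    exact Int.toNat_natCast _
  have e2 : (PySem.Int.mod (n - 1) 6).toNat = N % 6 := by
    rw [hcast]
    rw [show (6 : Int) = ((6 : Nat) : Int) from rfl, PySem.Int.mod_natCast]
    exact Int.toNat_natCast _
  simp only [e1, e2]
  rw [rsum_mod3]
  rw [loopA_eq N n 1 1 (by omega) (by omega)]
  rw [show (1 : Nat) = noThree 1 from noThree_one.symm, iterA_iterB, main_index]
  rfl

-- ===== VERDICT (by name: the statement is the Claim_ definition above) =====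
theorem solution_spec : Claim_equal_solution := by
  intro n _ hpre
  unfold Spec_solution
  exact final n hpre
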